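-- pv_equiv track=rewrite | github.com/NYU-IonyFox/AI-Safety-Lab | app/analyzers/policy_scope.py | _find_first_match
-- ===== SOURCE A (Python) =====
-- def _find_first_match(blobs: dict[str, str], tokens: list[str]) -> tuple[str, int] | None:
--     lowered_tokens = [token.lower() for token in tokens]
--     for name, blob in blobs.items():
--         for index, line in enumerate(blob.splitlines(), start=1):
--             lowered_line = line.lower()
--             if any(token in lowered_line for token in lowered_tokens):
--                 return name, index
--     return None
-- ===== SOURCE B (Python) =====
-- def _find_first_match(blobs: dict[str, str], tokens: list[str]) -> tuple[str, int] | None: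
--     lowered = [token.lower() for token in tokens]
--     for name, blob in blobs.items():
--         lines = [line.lower() for line in blob.splitlines()]
--         best = None
--         for token in lowered:
--             idx = _first_line_with(lines, token)
--             if idx is not None and (best is None or idx < best):
--                 best = idx
--         if best is not None:
--             return name, best
--     return None
--
--
-- def _first_line_with(lines: list[str], token: str) -> int | None:
--     for index, line in enumerate(lines, start=1):
--         if token in line:
--             return index
--     return None
-- ===== Notes on version B (the rewrite author's own statement) =====
-- stated objective: alternative
-- what changed: Replaced A's line-major scan (for each line, test every token with any()) by a token-major scan: for each token a helper finds its first matching line, and a running minimum over tokens yields the first matching line per blob.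
import Mathlib
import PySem

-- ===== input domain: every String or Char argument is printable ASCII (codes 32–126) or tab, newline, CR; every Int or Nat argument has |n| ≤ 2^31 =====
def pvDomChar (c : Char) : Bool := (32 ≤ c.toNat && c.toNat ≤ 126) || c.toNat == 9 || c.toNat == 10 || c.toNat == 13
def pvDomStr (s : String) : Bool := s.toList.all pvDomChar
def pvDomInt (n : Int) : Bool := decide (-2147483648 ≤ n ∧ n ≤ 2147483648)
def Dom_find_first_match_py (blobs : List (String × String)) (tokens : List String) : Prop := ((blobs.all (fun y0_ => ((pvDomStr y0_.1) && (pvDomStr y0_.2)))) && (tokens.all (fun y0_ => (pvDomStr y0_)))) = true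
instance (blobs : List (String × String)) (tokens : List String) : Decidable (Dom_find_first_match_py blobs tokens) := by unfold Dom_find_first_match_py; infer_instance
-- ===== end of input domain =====

-- B restructures A's line-major scan (per line, test every token) into a token-major scan
-- (per token, find its first line, keep the minimum index); objective: alternative, same cost.

-- ===== PORT A =====
-- inner loop of A: 'for index, line in enumerate(blob.splitlines(), start=1): if any(...)'
def pvInnerA (lowered : List String) : List (Int × String) → Option Int
  | [] => none
  | (i, line) :: rest =>
    if lowered.any (fun t => PySem.Str.isIn t (PySem.Str.lower line)) then some i
    else pvInnerA lowered rest

-- outer loop of A over blobs.items()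
def pvOuterA (lowered : List String) : List (String × String) → Option (String × Int)
  | [] => none
  | (name, blob) :: rest =>
    match pvInnerA lowered (PySem.List.enumerate (PySem.Str.splitlines blob) 1) with
    | some i => some (name, i)
    | none => pvOuterA lowered rest

def find_first_match_py (blobs : List (String × String)) (tokens : List String) : Option (String × Int) :=
  pvOuterA (tokens.map PySem.Str.lower) blobs

-- ===== PORT B =====
-- B's helper _first_line_with: first enumerated line containing the token
def pvFirstLineWith : List (Int × String) → String → Option Int
  | [], _ => none
  | (i, line) :: rest, token =>
    if PySem.Str.isIn token line then some i else pvFirstLineWith rest token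

-- B's 'if idx is not None and (best is None or idx < best): best = idx'
def pvBestUpdate (best idx : Option Int) : Option Int :=
  match idx, best with
  | none, b => b
  | some i, none => some i
  | some i, some b => if i < b then some i else some b

def pvOuterB (lowered : List String) : List (String × String) → Option (String × Int)
  | [] => none
  | (name, blob) :: rest =>
    let lines := (PySem.Str.splitlines blob).map PySem.Str.lower
    let best := lowered.foldl
      (fun best token => pvBestUpdate best (pvFirstLineWith (PySem.List.enumerate lines 1) token)) none
    match best with
    | some i => some (name, i)
    | none => pvOuterB lowered rest

def find_first_match_py_alt (blobs : List (String × String)) (tokens : List String) : Option (String × Int) :=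
  pvOuterB (tokens.map PySem.Str.lower) blobs

-- ===== PRECONDITION & SPEC =====
def Spec_find_first_match_py (blobs : List (String × String)) (tokens : List String) (out : Option (String × Int)) : Prop := out = find_first_match_py_alt blobs tokens
instance (blobs : List (String × String)) (tokens : List String) (out : Option (String × Int)) : Decidable (Spec_find_first_match_py blobs tokens out) := by unfold Spec_find_first_match_py; infer_instance

-- ===== CLAIM (what is proved, stated in full; the proofs are below) =====
def Claim_equal_find_first_match_py : Prop := ∀ (blobs : List (String × String)) (tokens : List String), Dom_find_first_match_py blobs tokens → Spec_find_first_match_py blobs tokens (find_first_match_py blobs tokens)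

-- ===== LEMMAS AND PROOFS =====

-- pvBestUpdate is an option-valued min: none is the identity and it is associative.
theorem pvBestUpdate_none_right (b : Option Int) : pvBestUpdate b none = b := by
  cases b <;> rfl

theorem pvBestUpdate_none_left (v : Option Int) : pvBestUpdate none v = v := by
  cases v <;> rfl

theorem pvBestUpdate_some_some (a b : Int) :
    pvBestUpdate (some a) (some b) = some (min a b) := by
  simp only [pvBestUpdate, min_def]
  split_ifs <;> first | rfl | omega

theorem pvBestUpdate_assoc (a b c : Option Int) :
    pvBestUpdate (pvBestUpdate a b) c = pvBestUpdate a (pvBestUpdate b c) := by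
  cases a <;> cases b <;> cases c <;>
    simp only [pvBestUpdate_none_left, pvBestUpdate_none_right, pvBestUpdate_some_some] <;>
    rw [min_assoc]

-- the fold of pvBestUpdate starting at acc equals acc min the fold starting at none
theorem foldl_best_acc (g : String → Option Int) (toks : List String) (acc : Option Int) :
    toks.foldl (fun b t => pvBestUpdate b (g t)) acc
      = pvBestUpdate acc (toks.foldl (fun b t => pvBestUpdate b (g t)) none) := by
  induction toks generalizing acc with
  | nil => simp [pvBestUpdate_none_right]
  | cons t ts ih =>
    simp only [List.foldl_cons]
    rw [ih (pvBestUpdate acc (g t)), ih (pvBestUpdate none (g t)),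
      pvBestUpdate_none_left, pvBestUpdate_assoc]

-- every index produced by pvFirstLineWith on lines whose indices exceed s exceeds s
theorem firstLineWith_gt (qs : List (Int × String)) (t : String) (s i : Int)
    (hlt : ∀ p ∈ qs, s < p.1) (h : pvFirstLineWith qs t = some i) : s < i := by
  induction qs with
  | nil => simp [pvFirstLineWith] at h
  | cons p rest ih =>
    obtain ⟨j, line⟩ := p
    simp only [pvFirstLineWith] at h
    split at h
    · cases h; exact hlt _ (List.mem_cons_self)
    · exact ih (fun q hq => hlt q (List.mem_cons_of_mem _ hq)) h

-- the token-major min fold over qs is some i only with s < i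
theorem foldM_gt (qs : List (Int × String)) (toks : List String) (s : Int)
    (hlt : ∀ p ∈ qs, s < p.1) :
    ∀ i, toks.foldl (fun b t => pvBestUpdate b (pvFirstLineWith qs t)) none = some i → s < i := by
  induction toks with
  | nil => intro i h; simp at h
  | cons t ts ih =>
    intro i h
    rw [List.foldl_cons, foldl_best_acc, pvBestUpdate_none_left] at h
    cases hf : pvFirstLineWith qs t with
    | none =>
      rw [hf, pvBestUpdate_none_left] at h
      exact ih i h
    | some j =>
      cases hM : ts.foldl (fun b t => pvBestUpdate b (pvFirstLineWith qs t)) none with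
      | none =>
        rw [hf, hM, pvBestUpdate_none_right, Option.some_inj] at h
        rw [← h]; exact firstLineWith_gt qs t s j hlt hf
      | some m =>
        rw [hf, hM, pvBestUpdate_some_some, Option.some_inj] at h
        have h1 := firstLineWith_gt qs t s j hlt hf
        have h2 := ih m hM
        omega

-- KEY: prepending a line (s, x) to the enumeration — the token-major min returns some s
-- exactly when some token occurs in x, and otherwise ignores the new line.
theorem foldM_cons (toks : List String) (s : Int) (x : String) (qs : List (Int × String))
    (hlt : ∀ p ∈ qs, s < p.1) :
    toks.foldl (fun b t => pvBestUpdate b (pvFirstLineWith ((s, x) :: qs) t)) none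
      = if toks.any (fun t => PySem.Str.isIn t x) then some s
        else toks.foldl (fun b t => pvBestUpdate b (pvFirstLineWith qs t)) none := by
  induction toks with
  | nil => simp
  | cons t ts ih =>
    rw [List.foldl_cons, foldl_best_acc, pvBestUpdate_none_left, ih, List.any_cons]
    have hstep : pvFirstLineWith ((s, x) :: qs) t
        = if PySem.Str.isIn t x then some s else pvFirstLineWith qs t := rfl
    rw [hstep]
    by_cases hx : PySem.Str.isIn t x = true
    · rw [hx]
      simp only [if_true, Bool.true_or]
      by_cases hts : ts.any (fun t => PySem.Str.isIn t x) = true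
      · rw [if_pos hts, pvBestUpdate_some_some, min_self]
      · rw [if_neg hts]
        cases hM : ts.foldl (fun b t => pvBestUpdate b (pvFirstLineWith qs t)) none with
        | none => rw [pvBestUpdate_none_right]
        | some m =>
          have := foldM_gt qs ts s hlt m hM
          rw [pvBestUpdate_some_some, Option.some_inj]
          omega
    · rw [Bool.not_eq_true] at hx
      rw [hx]
      simp only [Bool.false_eq_true, if_false, Bool.false_or]
      by_cases hts : ts.any (fun t => PySem.Str.isIn t x) = true
      · rw [if_pos hts, if_pos hts]
        cases hf : pvFirstLineWith qs t with
        | none => rw [pvBestUpdate_none_left]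
        | some j =>
          have := firstLineWith_gt qs t s j hlt hf
          rw [pvBestUpdate_some_some, Option.some_inj]
          omega
      · rw [if_neg hts, if_neg hts, List.foldl_cons,
          foldl_best_acc _ ts (pvBestUpdate none (pvFirstLineWith qs t)),
          pvBestUpdate_none_left]

-- indices of an enumeration starting at s + 1 exceed s
theorem enum_gt (lines : List String) (s : Int) :
    ∀ p ∈ PySem.List.enumerate lines (s + 1), s < p.1 := by
  intro p hp
  rw [PySem.List.mem_enumerate_iff] at hp
  obtain ⟨k, hk, rfl⟩ := hp
  have : (0 : Int) ≤ (k : Int) := Int.natCast_nonneg k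
  simp only
  omega

-- per-blob equivalence: A's line-major first match equals B's token-major min
theorem inner_eq (lines : List String) (toks : List String) (s : Int) :
    pvInnerA toks (PySem.List.enumerate lines s)
      = toks.foldl
          (fun b t => pvBestUpdate b (pvFirstLineWith (PySem.List.enumerate (lines.map PySem.Str.lower) s) t))
          none := by
  induction lines generalizing s with
  | nil =>
    simp only [PySem.List.enumerate_nil, List.map_nil, pvInnerA]
    induction toks with
    | nil => simp
    | cons t ts iht =>
      rw [List.foldl_cons]
      simpa [pvFirstLineWith, pvBestUpdate_none_right] using iht
  | cons l rest ih =>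
    simp only [List.map_cons, PySem.List.enumerate_cons, pvInnerA]
    rw [foldM_cons toks s (PySem.Str.lower l) _ (enum_gt (rest.map PySem.Str.lower) s)]
    split
    · rfl
    · exact ih (s + 1)

theorem outer_eq (lowered : List String) (blobs : List (String × String)) :
    pvOuterA lowered blobs = pvOuterB lowered blobs := by
  induction blobs with
  | nil => rfl
  | cons p rest ih =>
    obtain ⟨name, blob⟩ := p
    simp only [pvOuterA, pvOuterB]
    rw [inner_eq (PySem.Str.splitlines blob) lowered 1, ih]

-- ===== VERDICT (by name: the statement is the Claim_ definition above) =====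
theorem find_first_match_py_spec : Claim_equal_find_first_match_py := by
  intro blobs tokens _
  unfold Spec_find_first_match_py find_first_match_py find_first_match_py_alt
  exact outer_eq _ blobs
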